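-- pv_equiv track=rewrite | github.com/kmkurn/ppt-eacl2021 | readers.py | get_proj_edges
-- ===== SOURCE A (Python) =====
-- from collections import defaultdict
-- from typing import Collection, Iterator, Optional, Set, Tuple
--
-- def get_proj_edges(edges: Collection[Tuple[int, int]]) -> Iterator[Tuple[int, int]]:
--     """Obtain projective edges from a collection of edges of a dependency tree."""
--     adj_set: dict = defaultdict(set)
--     for u, v in edges:
--         adj_set[u].add(v)
--
--     def dfs(root: int) -> Set[int]:
--         stack, seen = [root], set()
--         while stack:
--             u = stack.pop()
--             seen.add(u)
--             for v in adj_set[u]: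
--                 if v not in seen:
--                     stack.append(v)
--         return seen
--
--     nodes = {u for e in edges for u in e}
--     reachable_from = {u: dfs(u) for u in nodes}
--     for u, v in edges:
--         for w in range(min(u, v) + 1, max(u, v)):
--             if w not in reachable_from[u]:
--                 break
--         else:
--             yield (u, v)
-- ===== SOURCE B (Python) =====
-- from collections import defaultdict
--
--
-- def get_proj_edges(edges):
--     """Obtain projective edges from a collection of edges of a dependency tree.
--
--     Instead of scanning every integer strictly between the endpoints, count how
--     many reachable nodes fall inside the open interval and compare with its
--     width; reachability is computed only for nodes that head an edge.
--     """
--     adj_set: dict = defaultdict(set)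
--     for u, v in edges:
--         adj_set[u].add(v)
--
--     def dfs(root):
--         stack, seen = [root], set()
--         while stack:
--             u = stack.pop()
--             seen.add(u)
--             for v in adj_set[u]:
--                 if v not in seen:
--                     stack.append(v)
--         return seen
--
--     heads = {u for u, _ in edges}
--     reach = {u: dfs(u) for u in heads}
--     for u, v in edges:
--         lo, hi = (u, v) if u <= v else (v, u)
--         cnt = sum(1 for x in reach[u] if lo < x < hi)
--         if cnt == max(hi - lo - 1, 0):
--             yield (u, v)
-- ===== Notes on version B (the rewrite author's own statement) =====
-- stated objective: alternative
-- what changed: The per-edge projectivity test scanning every integer strictly between the endpoints (with early break) is replaced by counting the reachable nodes that fall in the open interval and comparing with its width, and reachability is precomputed only for nodes that head an edge instead of all nodes.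
import Mathlib
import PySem

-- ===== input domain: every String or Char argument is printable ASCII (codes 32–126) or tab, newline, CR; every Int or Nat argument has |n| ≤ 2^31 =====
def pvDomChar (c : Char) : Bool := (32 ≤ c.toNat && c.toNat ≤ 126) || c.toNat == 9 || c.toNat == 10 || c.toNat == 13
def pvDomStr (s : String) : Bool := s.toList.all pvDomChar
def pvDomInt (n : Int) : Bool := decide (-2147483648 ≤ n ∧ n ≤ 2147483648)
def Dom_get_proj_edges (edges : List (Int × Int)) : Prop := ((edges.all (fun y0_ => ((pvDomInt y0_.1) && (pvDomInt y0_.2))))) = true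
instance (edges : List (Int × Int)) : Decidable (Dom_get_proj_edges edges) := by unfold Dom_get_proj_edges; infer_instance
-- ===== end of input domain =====

-- B replaces A's per-edge scan over every integer strictly between the endpoints by a count of
-- reachable nodes inside the open interval, and computes reachability only for edge heads
-- (objective: alternative algorithm, same precomputation of reachability).

-- ===== PORT A =====
-- shared precomputation (identical Python code in A and B): adjacency sets and the stack DFS
def pvAdj (edges : List (Int × Int)) : PySem.Dict Int (PySem.Set Int) :=
  edges.foldl (fun d uv => d.insert uv.1 (PySem.Set.add (d.getD uv.1 PySem.Set.empty) uv.2))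
    PySem.Dict.empty

-- the Python while-loop over the explicit stack; fuel bounds the number of pops (ample:
-- each pop of an unseen node pushes at most all adjacency entries, pops of seen nodes push nothing)
def pvDfsLoop (adj : PySem.Dict Int (PySem.Set Int)) :
    Nat → PySem.Set Int → List Int → PySem.Set Int
  | 0, seen, _ => seen
  | _ + 1, seen, [] => seen
  | fuel + 1, seen, u :: st =>
      let seen' := PySem.Set.add seen u
      pvDfsLoop adj fuel seen'
        ((((adj.getD u PySem.Set.empty).filter (fun v => !(PySem.Set.contains seen' v))).reverse) ++ st)

def pvDfs (adj : PySem.Dict Int (PySem.Set Int)) (root : Int) (fuel : Nat) : PySem.Set Int :=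
  pvDfsLoop adj fuel PySem.Set.empty [root]

-- dict comprehension {u: dfs(u) for u in keys}
def pvReachDict (adj : PySem.Dict Int (PySem.Set Int)) (fuel : Nat) (keys : List Int) :
    PySem.Dict Int (PySem.Set Int) :=
  keys.foldl (fun d u => d.insert u (pvDfs adj u fuel)) PySem.Dict.empty

-- A's inner loop: 'for w in range(lo+1, hi): if w not in R: break / else: yield'
def pvScan (S : PySem.Set Int) : Nat → Int → Bool
  | 0, _ => true
  | n + 1, w => if PySem.Set.contains S w then pvScan S n (w + 1) else false

def get_proj_edges (edges : List (Int × Int)) : List (Int × Int) :=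
  let adj := pvAdj edges
  let nodes := PySem.Set.ofList (edges.flatMap (fun uv => [uv.1, uv.2]))
  let fuel := (edges.length + 2) * (edges.length + 2)
  let reach := pvReachDict adj fuel nodes
  edges.foldl (fun acc uv =>
    let lo := min uv.1 uv.2
    let hi := max uv.1 uv.2
    if pvScan (reach.getD uv.1 PySem.Set.empty) ((hi - lo - 1).toNat) (lo + 1) then
      acc ++ [uv]
    else acc) []

-- ===== PORT B =====
def get_proj_edges_alt (edges : List (Int × Int)) : List (Int × Int) :=
  let adj := pvAdj edges
  let heads := PySem.Set.ofList (edges.map Prod.fst)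
  let fuel := (edges.length + 2) * (edges.length + 2)
  let reach := pvReachDict adj fuel heads
  edges.foldl (fun acc uv =>
    let p := if uv.1 ≤ uv.2 then (uv.1, uv.2) else (uv.2, uv.1)
    let cnt : Int := (reach.getD uv.1 PySem.Set.empty).foldl
      (fun c x => if p.1 < x ∧ x < p.2 then c + 1 else c) 0
    if cnt = max (p.2 - p.1 - 1) 0 then acc ++ [uv] else acc) []

-- ===== PRECONDITION & SPEC =====
def Spec_get_proj_edges (edges : List (Int × Int)) (out : List (Int × Int)) : Prop := out = get_proj_edges_alt edges
instance (edges : List (Int × Int)) (out : List (Int × Int)) : Decidable (Spec_get_proj_edges edges out) := by unfold Spec_get_proj_edges; infer_instance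

-- ===== CLAIM (what is proved, stated in full; the proofs are below) =====
def Claim_equal_get_proj_edges : Prop := ∀ (edges : List (Int × Int)), Dom_get_proj_edges edges → Spec_get_proj_edges edges (get_proj_edges edges)

-- ===== LEMMAS AND PROOFS =====

-- lookup in a fold of inserts with values f u: first (= any) occurrence wins since values agree
theorem pv_getD_foldl_insert_fn (f : Int → PySem.Set Int) (keys : List Int)
    (d : PySem.Dict Int (PySem.Set Int)) (k : Int) (dflt : PySem.Set Int) :
    (keys.foldl (fun d u => d.insert u (f u)) d).getD k dflt
      = if k ∈ keys then f k else d.getD k dflt := by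
  induction keys generalizing d with
  | nil => simp
  | cons a t ih =>
    simp only [List.foldl_cons, ih, PySem.Dict.getD_insert, List.mem_cons]
    by_cases h1 : k ∈ t <;> by_cases h2 : k = a <;> simp [h1, h2]

theorem pv_getD_reachDict (adj : PySem.Dict Int (PySem.Set Int)) (fuel : Nat)
    (keys : List Int) (k : Int) (dflt : PySem.Set Int) (hk : k ∈ keys) :
    (pvReachDict adj fuel keys).getD k dflt = pvDfs adj k fuel := by
  unfold pvReachDict
  rw [pv_getD_foldl_insert_fn, if_pos hk]

theorem pvDfsLoop_nodup (adj : PySem.Dict Int (PySem.Set Int)) (fuel : Nat)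
    (seen : PySem.Set Int) (st : List Int) (h : seen.Nodup) :
    (pvDfsLoop adj fuel seen st).Nodup := by
  induction fuel generalizing seen st with
  | zero => simpa [pvDfsLoop] using h
  | succ n ih =>
    cases st with
    | nil => simpa [pvDfsLoop] using h
    | cons u rest => exact ih _ _ (PySem.Set.nodup_add seen u h)

theorem pvScan_iff (S : PySem.Set Int) (n : Nat) (w : Int) :
    pvScan S n w = true ↔ ∀ i : Nat, i < n → (w + i) ∈ S := by
  induction n generalizing w with
  | zero => simp [pvScan]
  | succ n ih =>
    simp only [pvScan]
    cases hc : PySem.Set.contains S w with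
    | false =>
      simp only [if_false, Bool.false_eq_true, false_iff]
      intro hall
      have h0 := hall 0 (Nat.succ_pos n)
      rw [Nat.cast_zero, add_zero, ← PySem.Set.contains_iff S, hc] at h0
      exact absurd h0 (by simp)
    | true =>
      simp only [if_pos, ih]
      constructor
      · intro hall i hi
        cases i with
        | zero => simpa using (PySem.Set.contains_iff S w).mp hc
        | succ j =>
          have := hall j (by omega)
          have he : w + ((j : Nat) + 1 : Nat) = (w + 1) + (j : Nat) := by push_cast; ring
          rwa [he]
      · intro hall i hi
        have := hall (i + 1) (by omega)
        have he : w + ((i : Nat) + 1 : Nat) = (w + 1) + (i : Nat) := by push_cast; ring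
        rwa [he] at this

theorem pvScan_eq_count (S : PySem.Set Int) (hS : S.Nodup) (lo hi : Int) (hle : lo ≤ hi) :
    (pvScan S ((hi - lo - 1).toNat) (lo + 1) = true) ↔
      (S.foldl (fun c x => if lo < x ∧ x < hi then c + 1 else c) (0 : Int)) = max (hi - lo - 1) 0 := by
  have hfold : S.foldl (fun c x => if lo < x ∧ x < hi then c + 1 else c) (0 : Int)
      = ((S.filter (fun x => decide (lo < x ∧ x < hi))).length : Int) := by
    rw [show (fun (c : Int) x => if lo < x ∧ x < hi then c + 1 else c)
        = (fun (c : Int) x => if (fun x => decide (lo < x ∧ x < hi)) x = true then c + 1 else c)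
        from by funext c x; simp]
    rw [PySem.List.foldl_count_if, List.countP_eq_length_filter]
    simp
  rw [hfold, pvScan_iff]
  set F := (S.filter (fun x => decide (lo < x ∧ x < hi))).toFinset with hF
  have hnodupF : (S.filter (fun x => decide (lo < x ∧ x < hi))).Nodup := hS.filter _
  have hcard : F.card = (S.filter (fun x => decide (lo < x ∧ x < hi))).length :=
    List.toFinset_card_of_nodup hnodupF
  have hsub : F ⊆ Finset.Ioo lo hi := by
    intro x hx
    rw [hF, List.mem_toFinset, List.mem_filter] at hx
    simp only [decide_eq_true_eq] at hx
    exact Finset.mem_Ioo.mpr hx.2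
  have hIoo : (Finset.Ioo lo hi).card = (hi - lo - 1).toNat := Int.card_Ioo lo hi
  constructor
  · intro hall
    have heq : F = Finset.Ioo lo hi := by
      apply Finset.Subset.antisymm hsub
      intro x hx
      rw [Finset.mem_Ioo] at hx
      have hidx : ((x - lo - 1).toNat : Int) = x - lo - 1 := by omega
      have hxmem : x ∈ S := by
        have := hall (x - lo - 1).toNat (by omega)
        rwa [show lo + 1 + ((x - lo - 1).toNat : Int) = x by omega] at this
      rw [hF, List.mem_toFinset, List.mem_filter]
      exact ⟨hxmem, by simp; omega⟩
    rw [← hcard, heq, hIoo]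
    omega
  · intro hlen i hi'
    have hle' : F.card = (Finset.Ioo lo hi).card := by
      rw [hcard, hIoo]; omega
    have heq : F = Finset.Ioo lo hi :=
      Finset.eq_of_subset_of_card_le hsub (le_of_eq hle'.symm)
    have hmem : lo + 1 + (i : Int) ∈ Finset.Ioo lo hi := by
      rw [Finset.mem_Ioo]; omega
    rw [← heq, hF, List.mem_toFinset, List.mem_filter] at hmem
    exact hmem.1

-- ===== VERDICT (by name: the statement is the Claim_ definition above) =====
theorem get_proj_edges_spec : Claim_equal_get_proj_edges := by
  intro edges _
  unfold Spec_get_proj_edges get_proj_edges get_proj_edges_alt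
  apply PySem.List.foldl_congr_mem
  intro acc uv hmem
  have hu_nodes : uv.1 ∈ PySem.Set.ofList (edges.flatMap (fun uv => [uv.1, uv.2])) := by
    rw [PySem.Set.mem_ofList]
    exact List.mem_flatMap.mpr ⟨uv, hmem, by simp⟩
  have hu_heads : uv.1 ∈ PySem.Set.ofList (edges.map Prod.fst) := by
    rw [PySem.Set.mem_ofList]
    exact List.mem_map.mpr ⟨uv, hmem, rfl⟩
  rw [pv_getD_reachDict _ _ _ _ _ hu_nodes, pv_getD_reachDict _ _ _ _ _ hu_heads]
  set S := pvDfs (pvAdj edges) uv.1 ((edges.length + 2) * (edges.length + 2)) with hSdef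
  have hS : S.Nodup := pvDfsLoop_nodup _ _ _ _ (by simp [PySem.Set.empty])
  have hpair : (if uv.1 ≤ uv.2 then (uv.1, uv.2) else (uv.2, uv.1)) = (min uv.1 uv.2, max uv.1 uv.2) := by
    by_cases h : uv.1 ≤ uv.2
    · simp [h]
    · rw [if_neg h]
      push Not at h
      rw [min_eq_right h.le, max_eq_left h.le]
  rw [hpair]
  have hiff := pvScan_eq_count S hS (min uv.1 uv.2) (max uv.1 uv.2) (min_le_max)
  by_cases hcond : pvScan S ((max uv.1 uv.2 - min uv.1 uv.2 - 1).toNat) (min uv.1 uv.2 + 1) = true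
  · rw [if_pos hcond, if_pos (hiff.mp hcond)]
  · rw [if_neg hcond, if_neg (fun h => hcond (hiff.mpr h))]
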